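-- pv_equiv track=rewrite | github.com/parttee/tira2020 | week7/distances.py | find
-- ===== SOURCE A (Python) =====
-- from heapq import heappush, heappop
--
-- def find(t, k):
--     t = sorted(t)
--     n = len(t)
--
--     dist = []
--
--     for i in range(n - 1):
--         heappush(dist, (t[i + 1] - t[i], i, 1))
--
--     r = -1
--     x = 0
--
--     while x < k:
--         item = heappop(dist)
--         r = item[0]
--         i = item[1]
--         a = item[2] + 1
--         if i + a < n:
--             heappush(dist, (t[i + a] - t[i], i, a))
--         x += 1
--
--     return r
-- ===== SOURCE B (Python) =====
-- def find(t, k):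
--     if k <= 0:
--         return -1
--     s = sorted(t)
--     n = len(s)
--     dists = sorted(s[j] - s[i] for i in range(n) for j in range(i + 1, n))
--     return dists[k - 1]
-- ===== Notes on version B (the rewrite author's own statement) =====
-- stated objective: simpler
-- what changed: A lazily k-way-merges the per-start-index gap streams of the sorted list through a heap, popping k times; B materializes the full list of pairwise gaps once, sorts it, and returns its (k-1)-th element.
import Mathlib
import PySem

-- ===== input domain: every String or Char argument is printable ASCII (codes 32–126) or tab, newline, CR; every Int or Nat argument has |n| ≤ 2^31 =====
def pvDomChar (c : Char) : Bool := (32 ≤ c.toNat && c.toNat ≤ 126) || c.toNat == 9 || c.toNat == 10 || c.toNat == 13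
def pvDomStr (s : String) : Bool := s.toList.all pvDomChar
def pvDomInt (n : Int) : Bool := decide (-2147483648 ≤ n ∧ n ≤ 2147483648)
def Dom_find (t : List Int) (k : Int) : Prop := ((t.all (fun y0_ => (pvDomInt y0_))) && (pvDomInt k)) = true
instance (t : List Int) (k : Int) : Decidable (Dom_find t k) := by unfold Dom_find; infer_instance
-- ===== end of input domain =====

-- B replaces A's heap-based lazy k-way merge of per-index gap streams by sorting the
-- full list of pairwise gaps once and indexing its (k-1)-th element (objective: simpler).


-- ===== PORT A =====
-- heapq is ported as a min-priority queue over the lexicographic tuple order (pop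
-- returns the least (d, i, ·) triple present): exact here, because the heap always
-- holds at most one triple per start index i, so queued triples are pairwise distinct
-- and heapq's pop is exactly "remove the least triple".  The nonnegative Python ints
-- i and a are carried as Nat; all list indexing is in range wherever Python's is.
def pvLt3 (x y : Int × Nat × Nat) : Bool :=
  x.1 < y.1 || (x.1 == y.1 && (x.2.1 < y.2.1 || (x.2.1 == y.2.1 && x.2.2 < y.2.2)))

def pvPopMin : List (Int × Nat × Nat) → Option ((Int × Nat × Nat) × List (Int × Nat × Nat))
  | [] => none
  | x :: xs =>
    match pvPopMin xs with
    | none => some (x, [])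
    | some (m, rest) => if pvLt3 m x then some (m, x :: rest) else some (x, xs)

-- the 'while x < k' loop of A; fuel = k - x = number of iterations still to run
def pvFindLoop (s : List Int) : Nat → Int → List (Int × Nat × Nat) → Int
  | 0, r, _ => r
  | fuel + 1, r, dist =>
    match pvPopMin dist with
    | none => r    -- Python raises IndexError here (empty heap); excluded by Pre_find
    | some (item, rest) =>
      let i := item.2.1
      let a := item.2.2 + 1
      pvFindLoop s fuel item.1
        (if i + a < s.length then (s.getD (i + a) 0 - s.getD i 0, i, a) :: rest else rest)

def find (t : List Int) (k : Int) : Int :=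
  let s := PySem.List.sorted t (fun x => x) false
  let n := s.length
  pvFindLoop s k.toNat (-1)
    ((List.range (n - 1)).map (fun i => (s.getD (i + 1) 0 - s.getD i 0, i, 1)))

-- ===== PORT B =====
-- the generator  (s[j] - s[i] for i in range(n) for j in range(i+1, n))
def pvGaps (s : List Int) : List Int :=
  (List.range s.length).flatMap (fun i =>
    (List.range' (i + 1) (s.length - (i + 1))).map (fun j => s.getD j 0 - s.getD i 0))

def find_alt (t : List Int) (k : Int) : Int :=
  if k ≤ 0 then -1
  else
    let s := PySem.List.sorted t (fun x => x) false
    let dists := PySem.List.sorted (pvGaps s) (fun x => x) false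
    (PySem.List.pyGet? dists (k - 1)).getD 0    -- none = IndexError, excluded by Pre_find

-- ===== PRECONDITION & SPEC =====
-- Pre_find excludes exactly the inputs where A raises IndexError (heappop from an empty
-- heap): k exceeding the number len(t)*(len(t)-1)/2 of pairs.  A returns on all others.
def Pre_find (t : List Int) (k : Int) : Prop :=
  2 * k ≤ (t.length : Int) * ((t.length : Int) - 1)
instance (t : List Int) (k : Int) : Decidable (Pre_find t k) := by unfold Pre_find; infer_instance

def pvWitness_find : List Int × Int := ([0, 3, 1], 2)

def Spec_find (t : List Int) (k : Int) (out : Int) : Prop := out = find_alt t k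
instance (t : List Int) (k : Int) (out : Int) : Decidable (Spec_find t k out) := by unfold Spec_find; infer_instance

-- ===== CLAIM (what is proved, stated in full; the proofs are below) =====
def Claim_equal_find : Prop := ∀ (t : List Int) (k : Int), Dom_find t k → Pre_find t k → Spec_find t k (find t k)

-- ===== LEMMAS AND PROOFS =====

-- the multiset of distances still to be delivered by heap item (·, i, a):
-- the tail {s[i+b] - s[i] : a ≤ b < len(s) - i} of stream i
def pvExpand (s : List Int) (i a : Nat) : List Int :=
  (List.range' a (s.length - (i + a))).map (fun b => s.getD (i + b) 0 - s.getD i 0)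

-- heap items A creates: in-range successor index, distance field = its defining gap
def pvWFItem (s : List Int) (it : Int × Nat × Nat) : Prop :=
  it.2.1 + it.2.2 < s.length ∧ it.1 = s.getD (it.2.1 + it.2.2) 0 - s.getD it.2.1 0

-- multiset of all distances still to be delivered by a heap
def pvMS (s : List Int) (h : List (Int × Nat × Nat)) : Multiset Int :=
  (h : Multiset (Int × Nat × Nat)).bind (fun it => (pvExpand s it.2.1 it.2.2 : Multiset Int))

lemma pvPopMin_eq_none {h : List (Int × Nat × Nat)} : pvPopMin h = none ↔ h = [] := by
  cases h with
  | nil => simp [pvPopMin]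
  | cons x xs =>
    cases hx : pvPopMin xs with
    | none => simp [pvPopMin, hx]
    | some p => obtain ⟨m, rest⟩ := p; simp only [pvPopMin, hx]; split <;> simp

lemma pvPopMin_perm {h rest : List (Int × Nat × Nat)} {m : Int × Nat × Nat}
    (hp : pvPopMin h = some (m, rest)) : (m :: rest).Perm h := by
  induction h generalizing m rest with
  | nil => simp [pvPopMin] at hp
  | cons x xs ih =>
    cases hx : pvPopMin xs with
    | none =>
      simp only [pvPopMin, hx, Option.some.injEq, Prod.mk.injEq] at hp
      obtain ⟨rfl, rfl⟩ := hp
      have := pvPopMin_eq_none.mp hx; subst this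
      exact List.Perm.refl _
    | some p =>
      obtain ⟨m', rest'⟩ := p
      by_cases hlt : pvLt3 m' x
      · simp only [pvPopMin, hx, if_pos hlt, Option.some.injEq, Prod.mk.injEq] at hp
        obtain ⟨rfl, rfl⟩ := hp
        exact (List.Perm.swap _ _ _).trans ((ih hx).cons x)
      · simp only [pvPopMin, hx, if_neg hlt, Option.some.injEq, Prod.mk.injEq] at hp
        obtain ⟨rfl, rfl⟩ := hp
        exact List.Perm.refl _

lemma pvPopMin_min {h rest : List (Int × Nat × Nat)} {m : Int × Nat × Nat}
    (hp : pvPopMin h = some (m, rest)) : ∀ y ∈ h, m.1 ≤ y.1 := by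
  induction h generalizing m rest with
  | nil => simp [pvPopMin] at hp
  | cons x xs ih =>
    cases hx : pvPopMin xs with
    | none =>
      simp only [pvPopMin, hx, Option.some.injEq, Prod.mk.injEq] at hp
      obtain ⟨rfl, rfl⟩ := hp
      have := pvPopMin_eq_none.mp hx; subst this
      intro y hy; rcases List.mem_singleton.mp hy with rfl; exact le_refl _
    | some p =>
      obtain ⟨m', rest'⟩ := p
      by_cases hlt : pvLt3 m' x
      · simp only [pvPopMin, hx, if_pos hlt, Option.some.injEq, Prod.mk.injEq] at hp
        obtain ⟨rfl, rfl⟩ := hp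
        intro y hy
        rcases List.mem_cons.mp hy with rfl | hy'
        · simp only [pvLt3, Bool.or_eq_true, Bool.and_eq_true, decide_eq_true_eq,
            beq_iff_eq] at hlt
          rcases hlt with h1 | ⟨h1, _⟩ <;> omega
        · exact ih hx y hy'
      · simp only [pvPopMin, hx, if_neg hlt, Option.some.injEq, Prod.mk.injEq] at hp
        obtain ⟨rfl, rfl⟩ := hp
        simp only [pvLt3, Bool.or_eq_true, Bool.and_eq_true, decide_eq_true_eq,
          beq_iff_eq, not_or, not_and] at hlt
        have h1 : ¬ (m'.1 < x.1) := fun hcon => hlt.1 hcon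
        intro y hy
        rcases List.mem_cons.mp hy with rfl | hy'
        · exact le_refl _
        · exact le_trans (by omega) (ih hx y hy')

lemma pvExpand_cons {s : List Int} {i a : Nat} (hlt : i + a < s.length) :
    pvExpand s i a = (s.getD (i + a) 0 - s.getD i 0) :: pvExpand s i (a + 1) := by
  unfold pvExpand
  have h1 : s.length - (i + a) = (s.length - (i + (a + 1))) + 1 := by omega
  rw [h1, List.range'_succ, List.map_cons]

lemma pvExpand_nil {s : List Int} {i a : Nat} (hge : s.length ≤ i + a) :
    pvExpand s i a = [] := by
  unfold pvExpand
  rw [Nat.sub_eq_zero_of_le hge]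
  rfl

lemma pvGetD_mono {s : List Int} (hs : s.Pairwise (· ≤ ·)) {u v : Nat}
    (huv : u ≤ v) (hv : v < s.length) : s.getD u 0 ≤ s.getD v 0 := by
  rcases Nat.eq_or_lt_of_le huv with rfl | hlt
  · exact le_refl _
  · have hu : u < s.length := lt_trans hlt hv
    rw [List.getD_eq_getElem _ _ hu, List.getD_eq_getElem _ _ hv]
    exact List.pairwise_iff_getElem.mp hs u v hu hv hlt

lemma pvExpand_lb {s : List Int} (hs : s.Pairwise (· ≤ ·)) {it : Int × Nat × Nat}
    (hwf : pvWFItem s it) : ∀ x ∈ pvExpand s it.2.1 it.2.2, it.1 ≤ x := by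
  obtain ⟨d, i, a⟩ := it
  obtain ⟨hlt, hd⟩ := hwf
  intro x hx
  simp only [pvExpand, List.mem_map] at hx
  obtain ⟨b, hb, rfl⟩ := hx
  rw [List.mem_range'_1] at hb
  simp only at hd hlt ⊢
  rw [hd]
  exact sub_le_sub_right (pvGetD_mono hs (by omega) (by omega)) _

lemma pvMS_cons (s : List Int) (it : Int × Nat × Nat) (h : List (Int × Nat × Nat)) :
    pvMS s (it :: h) = (pvExpand s it.2.1 it.2.2 : Multiset Int) + pvMS s h := by
  simp [pvMS, ← Multiset.cons_coe, Multiset.cons_bind]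

lemma pvMS_perm (s : List Int) {h h' : List (Int × Nat × Nat)} (hp : h.Perm h') :
    pvMS s h = pvMS s h' := by
  unfold pvMS
  rw [Multiset.coe_eq_coe.mpr hp]

lemma pvMS_eq_flatMap (s : List Int) (h : List (Int × Nat × Nat)) :
    pvMS s h = ((h.flatMap fun it => pvExpand s it.2.1 it.2.2 : List Int) : Multiset Int) := by
  induction h with
  | nil => simp [pvMS]
  | cons it h ih =>
    rw [pvMS_cons, ih, List.flatMap_cons, ← Multiset.coe_add]

-- one pop of A's loop returns the least remaining distance; the loop invariant
lemma pvLoop_eq (s : List Int) (hs : s.Pairwise (· ≤ ·)) :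
    ∀ (fuel : Nat) (h : List (Int × Nat × Nat)) (r : Int) (rem : List Int),
      (∀ x ∈ h, pvWFItem s x) → pvMS s h = (rem : Multiset Int) →
      rem.Pairwise (· ≤ ·) → 0 < fuel → fuel ≤ rem.length →
      pvFindLoop s fuel r h = rem.getD (fuel - 1) 0 := by
  intro fuel
  induction fuel with
  | zero => intro h r rem _ _ _ hpos _; exact absurd hpos (by omega)
  | succ m ih =>
    intro h r rem hwf hms hrem _ hlenf
    obtain ⟨c, rem', rfl⟩ : ∃ c rem', rem = c :: rem' := by
      cases rem with
      | nil => simp at hlenf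
      | cons c rem' => exact ⟨c, rem', rfl⟩
    have hne : h ≠ [] := by
      rintro rfl
      have hcard := congrArg Multiset.card hms
      simp [pvMS] at hcard
    obtain ⟨it, rest, hpop⟩ : ∃ it rest, pvPopMin h = some (it, rest) := by
      cases hp : pvPopMin h with
      | none => exact absurd (pvPopMin_eq_none.mp hp) hne
      | some p => obtain ⟨it, rest⟩ := p; exact ⟨it, rest, rfl⟩
    have hperm := pvPopMin_perm hpop
    have hit : it ∈ h := hperm.subset (List.mem_cons_self)
    have hwfit := hwf it hit
    have hminMS : ∀ y ∈ pvMS s h, it.1 ≤ y := by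
      intro y hy
      rw [pvMS, Multiset.mem_bind] at hy
      obtain ⟨it', hit', hy'⟩ := hy
      rw [Multiset.mem_coe] at hit' hy'
      exact le_trans (pvPopMin_min hpop it' hit') (pvExpand_lb hs (hwf it' hit') y hy')
    have hmem : it.1 ∈ pvMS s h := by
      rw [pvMS, Multiset.mem_bind]
      refine ⟨it, Multiset.mem_coe.mpr hit, ?_⟩
      rw [Multiset.mem_coe, pvExpand_cons hwfit.1, ← hwfit.2]
      exact List.mem_cons_self
    have hc : it.1 = c := by
      have h1 : it.1 ≤ c := hminMS c (by rw [hms]; exact Multiset.mem_coe.mpr (List.mem_cons_self))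
      have h2 : it.1 ∈ (c :: rem' : List Int) := by
        rw [hms, Multiset.mem_coe] at hmem; exact hmem
      rcases List.mem_cons.mp h2 with h3 | h3
      · exact h3
      · exact le_antisymm h1 ((List.pairwise_cons.mp hrem).1 _ h3)
    obtain ⟨d0, i, a⟩ := it
    simp only at hc hminMS
    obtain ⟨hia, hd0⟩ : i + a < s.length ∧ d0 = s.getD (i + a) 0 - s.getD i 0 := hwfit
    have hmsrest : (pvExpand s i (a + 1) : Multiset Int) + pvMS s rest = (rem' : Multiset Int) := by
      have e1 : pvMS s h = pvMS s ((d0, i, a) :: rest) := pvMS_perm s hperm.symm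
      rw [pvMS_cons] at e1
      simp only at e1
      rw [pvExpand_cons hia, ← hd0, hms, ← Multiset.cons_coe, ← Multiset.cons_coe,
        Multiset.cons_add, ← hc] at e1
      exact ((Multiset.cons_inj_right d0).mp e1).symm
    have hwf' : ∀ x ∈ (if i + (a + 1) < s.length
        then (s.getD (i + (a + 1)) 0 - s.getD i 0, i, a + 1) :: rest else rest), pvWFItem s x := by
      intro x hx
      split at hx
      · rcases List.mem_cons.mp hx with rfl | hx'
        · exact ⟨by assumption, rfl⟩
        · exact hwf x (hperm.subset (List.mem_cons_of_mem _ hx'))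
      · exact hwf x (hperm.subset (List.mem_cons_of_mem _ hx))
    have hms' : pvMS s (if i + (a + 1) < s.length
        then (s.getD (i + (a + 1)) 0 - s.getD i 0, i, a + 1) :: rest else rest)
        = (rem' : Multiset Int) := by
      split
      · rw [pvMS_cons]; exact hmsrest
      · rw [← hmsrest, pvExpand_nil (by omega)]; simp
    have step : pvFindLoop s (m + 1) r h = pvFindLoop s m d0
        (if i + (a + 1) < s.length
          then (s.getD (i + (a + 1)) 0 - s.getD i 0, i, a + 1) :: rest else rest) := by
      simp only [pvFindLoop, hpop]
    show pvFindLoop s (m + 1) r h = (c :: rem').getD m 0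
    rw [step]
    cases Nat.eq_zero_or_pos m with
    | inl h0 =>
      subst h0
      simpa [pvFindLoop] using hc
    | inr hm =>
      have hlen' : m ≤ rem'.length := by
        simp only [List.length_cons] at hlenf; omega
      rw [ih _ _ _ hwf' hms' (List.pairwise_cons.mp hrem).2 hm hlen']
      cases m with
      | zero => omega
      | succ m' => simp

lemma pvExpand_one (s : List Int) (i : Nat) :
    pvExpand s i 1
      = (List.range' (i + 1) (s.length - (i + 1))).map (fun j => s.getD j 0 - s.getD i 0) := by
  unfold pvExpand
  rw [List.range'_eq_map_range, List.range'_eq_map_range, List.map_map, List.map_map]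
  apply List.map_congr_left
  intro b _
  simp only [Function.comp]
  have : i + (1 + b) = i + 1 + b := by omega
  rw [this]

lemma pvFlatMap_range_pred {α : Type} (n : Nat) (F : Nat → List α)
    (hF : ∀ i, n - 1 ≤ i → F i = []) :
    (List.range (n - 1)).flatMap F = (List.range n).flatMap F := by
  cases n with
  | zero => rfl
  | succ m =>
    rw [List.range_succ, List.flatMap_append]
    simp only [Nat.add_sub_cancel]
    rw [List.flatMap_cons, List.flatMap_nil, hF m (by omega)]
    simp

lemma pvGaps_eq (s : List Int) :
    (List.range (s.length - 1)).flatMap (fun i => pvExpand s i 1) = pvGaps s := by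
  unfold pvGaps
  have hF : (fun i => pvExpand s i 1)
      = (fun i => (List.range' (i + 1) (s.length - (i + 1))).map
          (fun j => s.getD j 0 - s.getD i 0)) := funext (pvExpand_one s)
  rw [hF]
  apply pvFlatMap_range_pred
  intro i hi
  rw [Nat.sub_eq_zero_of_le (by omega)]
  rfl

lemma pvGauss : ∀ n : Nat, 2 * (List.range n).sum = n * (n - 1) := by
  intro n
  induction n with
  | zero => rfl
  | succ m ih =>
    rw [List.range_succ, List.sum_append]
    simp only [List.sum_cons, List.sum_nil, add_zero]
    have h : (m + 1) * ((m + 1) - 1) = m * (m - 1) + 2 * m := by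
      cases m with
      | zero => rfl
      | succ m' => simp only [Nat.add_sub_cancel]; ring
    omega

lemma pvGaps_len (s : List Int) : 2 * (pvGaps s).length = s.length * (s.length - 1) := by
  unfold pvGaps
  rw [List.length_flatMap]
  simp only [List.length_map, List.length_range']
  have hbridge : (List.map (fun i => s.length - (i + 1)) (List.range s.length)).sum
      = ∑ j ∈ Finset.range s.length, (s.length - (j + 1)) := Nat.add_zero _
  rw [hbridge]
  have hrefl : ∑ j ∈ Finset.range s.length, (s.length - (j + 1))
      = ∑ j ∈ Finset.range s.length, j := by
    rw [← Finset.sum_range_reflect (fun j => j) s.length]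
    exact Finset.sum_congr rfl (fun j hj => by omega)
  rw [hrefl]
  have hgauss : 2 * ((List.range s.length).sum) = s.length * (s.length - 1) := pvGauss s.length
  have hbridge2 : (List.range s.length).sum = ∑ j ∈ Finset.range s.length, j := by
    have h3 : (List.map (fun i => i) (List.range s.length)).sum
        = ∑ j ∈ Finset.range s.length, j := Nat.add_zero _
    simpa using h3
  omega

-- ===== VERDICT (by name: the statement is the Claim_ definition above) =====
theorem find_spec : Claim_equal_find := by
  unfold Claim_equal_find
  intro t k _ hP
  unfold Pre_find at hP
  unfold Spec_find
  simp only [find, find_alt]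
  have hperm := PySem.List.sorted_perm t (fun x => x) false
  have hlen : (PySem.List.sorted t (fun x => x) false).length = t.length := hperm.length_eq
  have hs : (PySem.List.sorted t (fun x => x) false).Pairwise (· ≤ ·) := by
    simpa using PySem.List.sorted_pairwise (xs := t) (key := fun x => x)
  set s := PySem.List.sorted t (fun x => x) false with hsdef
  by_cases hk : k ≤ 0
  · rw [if_pos hk]
    have h0 : k.toNat = 0 := by omega
    rw [h0]
    rfl
  · rw [if_neg hk]
    have hk1 : 0 < k := by omega
    have hDperm := PySem.List.sorted_perm (pvGaps s) (fun x => x) false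
    have hDsorted : (PySem.List.sorted (pvGaps s) (fun x => x) false).Pairwise (· ≤ ·) := by
      simpa using PySem.List.sorted_pairwise (xs := pvGaps s) (key := fun x => x)
    set D := PySem.List.sorted (pvGaps s) (fun x => x) false with hDdef
    have hDlen : D.length = (pvGaps s).length := hDperm.length_eq
    have h2 : 2 * (pvGaps s).length = s.length * (s.length - 1) := pvGaps_len s
    have hkle : k.toNat ≤ D.length := by
      rw [hDlen]
      rcases Nat.eq_zero_or_pos s.length with h0 | h1
      · rw [← hlen, h0] at hP; simp at hP; omega
      · have hcast : ((s.length : Int)) * ((s.length : Int) - 1)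
            = ((s.length * (s.length - 1) : Nat) : Int) := by
          push_cast [Nat.cast_sub h1]; ring
        rw [← hlen, hcast, ← h2] at hP
        omega
    have hwfinit : ∀ x ∈ (List.range (s.length - 1)).map
        (fun i => (s.getD (i + 1) 0 - s.getD i 0, i, 1)), pvWFItem s x := by
      intro x hx
      simp only [List.mem_map, List.mem_range] at hx
      obtain ⟨i, hi, rfl⟩ := hx
      exact ⟨show i + 1 < s.length by omega, rfl⟩
    have hmsinit : pvMS s ((List.range (s.length - 1)).map
        (fun i => (s.getD (i + 1) 0 - s.getD i 0, i, 1))) = (D : Multiset Int) := by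
      rw [pvMS_eq_flatMap, List.flatMap_map]
      show (((List.range (s.length - 1)).flatMap fun i => pvExpand s i 1 : List Int) : Multiset Int)
          = (D : Multiset Int)
      rw [pvGaps_eq]
      exact Multiset.coe_eq_coe.mpr hDperm.symm
    rw [pvLoop_eq s hs k.toNat _ (-1) D hwfinit hmsinit hDsorted (by omega) hkle]
    have hidx : k - 1 = ((k.toNat - 1 : Nat) : Int) := by omega
    rw [hidx, PySem.List.pyGet?_natCast]
    have hlt : k.toNat - 1 < D.length := by omega
    rw [List.getElem?_eq_getElem hlt, List.getD_eq_getElem _ _ hlt]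
    rfl
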